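-- pv_equiv track=rewrite | github.com/koreacolumbia-dotcom/E-comm-marketing-hub | hero_main_top3_final_PRETTY_WHITE_FINAL_FIXED.py | _change_subtypes
-- ===== SOURCE A (Python) =====
-- from typing import List, Optional, Tuple, Dict, Any
--
-- def _change_subtypes(prev_row: Dict[str, str], curr_row: Dict[str, str], diffs: Dict[str, Dict[str, str]]) -> List[str]:
--     subtypes: List[str] = []
--     if (prev_row.get("rank", "") or "") != (curr_row.get("rank", "") or ""):
--         subtypes.append("rank_shift")
--     if any(k in diffs for k in {"img_url", "img_local", "img_signature"}):
--         subtypes.append("image_changed")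
--     if "href_clean" in diffs:
--         subtypes.append("link_changed")
--     if any(k in diffs for k in {"landing_title", "landing_subtitle", "landing_summary", "landing_keywords", "landing_category"}):
--         subtypes.append("landing_text_changed")
--     if "title" in diffs:
--         subtypes.append("title_changed")
--     if any(k in diffs for k in {"plan_start", "plan_end"}):
--         subtypes.append("date_changed")
--     if any(k in diffs for k in {"extract_source", "confidence_score", "is_fallback", "is_primary_hero"}):
--         subtypes.append("extractor_changed")
--     if not subtypes and diffs:
--         subtypes.append("content_changed")
--     return subtypes
-- ===== SOURCE B (Python) =====
-- # B inverts the mapping: one pass over the diff keys through a key->label index,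
-- # then ordered emission from the collected label set.
-- _KEY2LABEL = {
--     "img_url": "image_changed", "img_local": "image_changed", "img_signature": "image_changed",
--     "href_clean": "link_changed",
--     "landing_title": "landing_text_changed", "landing_subtitle": "landing_text_changed",
--     "landing_summary": "landing_text_changed", "landing_keywords": "landing_text_changed",
--     "landing_category": "landing_text_changed",
--     "title": "title_changed",
--     "plan_start": "date_changed", "plan_end": "date_changed",
--     "extract_source": "extractor_changed", "confidence_score": "extractor_changed",
--     "is_fallback": "extractor_changed", "is_primary_hero": "extractor_changed",
-- }
-- _ORDER = ["image_changed", "link_changed", "landing_text_changed",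
--           "title_changed", "date_changed", "extractor_changed"]
--
-- def _change_subtypes(prev_row, curr_row, diffs):
--     hit = {_KEY2LABEL[k] for k in diffs if k in _KEY2LABEL}
--     out = ["rank_shift"] if (prev_row.get("rank", "") or "") != (curr_row.get("rank", "") or "") else []
--     out.extend(label for label in _ORDER if label in hit)
--     if not out and diffs:
--         out.append("content_changed")
--     return out
-- ===== Notes on version B (the rewrite author's own statement) =====
-- stated objective: alternative
-- what changed: Inverts the traversal: instead of scanning diffs once per rule (seven conditionals each testing key membership), B makes a single pass over the diff keys through a key-to-label index to collect the set of triggered labels, then emits labels in the fixed canonical order by membership in that set.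
import Mathlib
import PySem

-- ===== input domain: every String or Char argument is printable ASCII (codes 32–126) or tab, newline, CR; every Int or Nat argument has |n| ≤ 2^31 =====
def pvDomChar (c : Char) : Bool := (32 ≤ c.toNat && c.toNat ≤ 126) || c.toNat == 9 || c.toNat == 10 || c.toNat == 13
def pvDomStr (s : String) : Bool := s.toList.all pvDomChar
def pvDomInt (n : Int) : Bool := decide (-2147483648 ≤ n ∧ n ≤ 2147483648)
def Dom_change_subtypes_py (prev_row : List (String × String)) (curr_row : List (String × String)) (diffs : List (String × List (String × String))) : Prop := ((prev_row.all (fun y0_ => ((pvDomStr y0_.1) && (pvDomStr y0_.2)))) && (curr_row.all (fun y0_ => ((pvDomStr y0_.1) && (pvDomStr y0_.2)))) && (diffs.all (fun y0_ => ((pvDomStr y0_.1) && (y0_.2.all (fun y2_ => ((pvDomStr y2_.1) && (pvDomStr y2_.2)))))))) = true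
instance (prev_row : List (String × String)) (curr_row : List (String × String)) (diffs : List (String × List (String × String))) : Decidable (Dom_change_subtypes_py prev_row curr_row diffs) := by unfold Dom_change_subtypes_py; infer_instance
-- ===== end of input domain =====

-- B inverts the traversal: one pass over the diff keys through a key->label index
-- collects the triggered labels, which are then emitted in canonical order (objective: alternative).

-- row.get(k, "") — association list, first match (dict convention)
def pvGetD (row : List (String × String)) (k : String) : String :=
  match row.find? (fun p => p.1 == k) with
  | some p => p.2
  | none => ""

-- `k in diffs`
def pvHasKey (diffs : List (String × List (String × String))) (k : String) : Bool :=
  diffs.any (fun p => p.1 == k)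

-- ===== PORT A =====
def change_subtypes_py (prev_row : List (String × String)) (curr_row : List (String × String)) (diffs : List (String × List (String × String))) : List String :=
  let subtypes : List String := []
  -- (x or "") on a string equals x, ported as the lookup itself
  let subtypes := if pvGetD prev_row "rank" != pvGetD curr_row "rank" then subtypes ++ ["rank_shift"] else subtypes
  let subtypes := if ["img_url", "img_local", "img_signature"].any (pvHasKey diffs) then subtypes ++ ["image_changed"] else subtypes
  let subtypes := if pvHasKey diffs "href_clean" then subtypes ++ ["link_changed"] else subtypes
  let subtypes := if ["landing_title", "landing_subtitle", "landing_summary", "landing_keywords", "landing_category"].any (pvHasKey diffs) then subtypes ++ ["landing_text_changed"] else subtypes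
  let subtypes := if pvHasKey diffs "title" then subtypes ++ ["title_changed"] else subtypes
  let subtypes := if ["plan_start", "plan_end"].any (pvHasKey diffs) then subtypes ++ ["date_changed"] else subtypes
  let subtypes := if ["extract_source", "confidence_score", "is_fallback", "is_primary_hero"].any (pvHasKey diffs) then subtypes ++ ["extractor_changed"] else subtypes
  let subtypes := if subtypes.isEmpty && !diffs.isEmpty then subtypes ++ ["content_changed"] else subtypes
  subtypes

-- ===== PORT B =====
-- the _KEY2LABEL dict literal as an association list (keys distinct), lookup = first match
def pvTable : List (String × String) :=
  [("img_url", "image_changed"), ("img_local", "image_changed"), ("img_signature", "image_changed"),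
   ("href_clean", "link_changed"),
   ("landing_title", "landing_text_changed"), ("landing_subtitle", "landing_text_changed"),
   ("landing_summary", "landing_text_changed"), ("landing_keywords", "landing_text_changed"),
   ("landing_category", "landing_text_changed"),
   ("title", "title_changed"),
   ("plan_start", "date_changed"), ("plan_end", "date_changed"),
   ("extract_source", "extractor_changed"), ("confidence_score", "extractor_changed"),
   ("is_fallback", "extractor_changed"), ("is_primary_hero", "extractor_changed")]

-- _KEY2LABEL[k] if k in _KEY2LABEL else None
def pvKey2Label (k : String) : Option String :=
  (pvTable.find? (fun p => p.1 == k)).map Prod.snd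

-- {_KEY2LABEL[k] for k in diffs if k in _KEY2LABEL} — set comprehension over the diff keys
def pvHit (diffs : List (String × List (String × String))) : PySem.Set String :=
  diffs.foldl (fun s p =>
    match pvKey2Label p.1 with
    | some l => PySem.Set.add s l
    | none => s) PySem.Set.empty

def pvOrder : List String :=
  ["image_changed", "link_changed", "landing_text_changed",
   "title_changed", "date_changed", "extractor_changed"]

def change_subtypes_py_alt (prev_row : List (String × String)) (curr_row : List (String × String)) (diffs : List (String × List (String × String))) : List String :=
  let hit := pvHit diffs
  let out := if pvGetD prev_row "rank" != pvGetD curr_row "rank" then ["rank_shift"] else []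
  let out := out ++ pvOrder.filter (fun label => PySem.Set.contains hit label)
  if out.isEmpty && !diffs.isEmpty then out ++ ["content_changed"] else out

-- ===== PRECONDITION & SPEC =====
def Spec_change_subtypes_py (prev_row : List (String × String)) (curr_row : List (String × String)) (diffs : List (String × List (String × String))) (out : List String) : Prop := out = change_subtypes_py_alt prev_row curr_row diffs
instance (prev_row : List (String × String)) (curr_row : List (String × String)) (diffs : List (String × List (String × String))) (out : List String) : Decidable (Spec_change_subtypes_py prev_row curr_row diffs out) := by unfold Spec_change_subtypes_py; infer_instance

-- ===== CLAIM =====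
def Claim_equal_change_subtypes_py : Prop := ∀ (prev_row : List (String × String)) (curr_row : List (String × String)) (diffs : List (String × List (String × String))), Dom_change_subtypes_py prev_row curr_row diffs → Spec_change_subtypes_py prev_row curr_row diffs (change_subtypes_py prev_row curr_row diffs)

-- ===== LEMMAS AND PROOFS =====

theorem pvBeq_comm (a b : String) : (a == b) = (b == a) := by
  by_cases h : a = b
  · simp [h]
  · have h2 : ¬ b = a := fun e => h e.symm
    simp [h, h2]

-- membership after Set.add
theorem pvContains_add (s : PySem.Set String) (x l : String) :
    PySem.Set.contains (PySem.Set.add s x) l = (PySem.Set.contains s l || (l == x)) := by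
  by_cases h : x ∈ s
  · by_cases hl : l = x <;> simp [PySem.Set.add, PySem.Set.contains, h, hl]
  · by_cases hl : l = x <;> simp [PySem.Set.add, PySem.Set.contains, h, hl]

-- membership in the collected label set, generalized over the accumulator
theorem pvContains_fold (diffs : List (String × List (String × String))) (s : PySem.Set String) (l : String) :
    PySem.Set.contains (diffs.foldl (fun s p =>
        match pvKey2Label p.1 with
        | some l => PySem.Set.add s l
        | none => s) s) l
      = (PySem.Set.contains s l || diffs.any (fun p => pvKey2Label p.1 == some l)) := by
  induction diffs generalizing s with
  | nil => simp
  | cons p rest ih =>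
    cases h : pvKey2Label p.1 with
    | none =>
      simp only [List.foldl_cons, List.any_cons, h]
      rw [ih]
      simp
    | some l' =>
      simp only [List.foldl_cons, List.any_cons, h]
      rw [ih, pvContains_add, Bool.or_assoc]
      rw [pvBeq_comm l l']
      simp

theorem pvContains_hit (diffs : List (String × List (String × String))) (l : String) :
    PySem.Set.contains (pvHit diffs) l = diffs.any (fun p => pvKey2Label p.1 == some l) := by
  rw [pvHit, pvContains_fold]
  simp [PySem.Set.empty, PySem.Set.contains]

-- merge of two `any`s over the same list
theorem pvAny_or {α : Type} (l : List α) (f g : α → Bool) :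
    (l.any f || l.any g) = l.any (fun x => f x || g x) := by
  induction l with
  | nil => rfl
  | cons x xs ih =>
    simp only [List.any_cons]
    cases f x <;> cases g x <;> simp_all

-- first-match lookup in a table with distinct keys, as an `any` over the table
theorem pvFind_label (tbl : List (String × String)) (k L : String)
    (hnd : (tbl.map Prod.fst).Nodup) :
    (((tbl.find? (fun p => p.1 == k)).map Prod.snd) == some L)
      = tbl.any (fun p => p.1 == k && p.2 == L) := by
  induction tbl with
  | nil => rfl
  | cons p t ih =>
    simp only [List.map_cons, List.nodup_cons] at hnd
    cases h : (p.1 == k) with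
    | false => simp [List.find?_cons, h, ih hnd.2]
    | true =>
      have hk : p.1 = k := by simpa using h
      have ht : t.any (fun q => q.1 == k && q.2 == L) = false := by
        simp only [List.any_eq_false]
        intro q hq
        have hqk : q.1 ≠ k := by
          intro e
          apply hnd.1
          rw [hk, ← e]
          exact List.mem_map_of_mem hq
        simp [hqk]
      simp [List.find?_cons, h, ht]

-- which keys trigger each label
theorem pvLabel_image (k : String) : (pvKey2Label k == some "image_changed") = (k == "img_url" || k == "img_local" || k == "img_signature") := by
  rw [pvKey2Label, pvFind_label _ _ _ (by decide)]
  simp [pvTable, pvBeq_comm (b := k), eq_comm (b := k), Bool.or_assoc]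
theorem pvLabel_link (k : String) : (pvKey2Label k == some "link_changed") = (k == "href_clean") := by
  rw [pvKey2Label, pvFind_label _ _ _ (by decide)]
  simp [pvTable, pvBeq_comm (b := k), eq_comm (b := k), Bool.or_assoc]
theorem pvLabel_landing (k : String) : (pvKey2Label k == some "landing_text_changed") = (k == "landing_title" || k == "landing_subtitle" || k == "landing_summary" || k == "landing_keywords" || k == "landing_category") := by
  rw [pvKey2Label, pvFind_label _ _ _ (by decide)]
  simp [pvTable, pvBeq_comm (b := k), eq_comm (b := k), Bool.or_assoc]
theorem pvLabel_title (k : String) : (pvKey2Label k == some "title_changed") = (k == "title") := by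
  rw [pvKey2Label, pvFind_label _ _ _ (by decide)]
  simp [pvTable, pvBeq_comm (b := k), eq_comm (b := k), Bool.or_assoc]
theorem pvLabel_date (k : String) : (pvKey2Label k == some "date_changed") = (k == "plan_start" || k == "plan_end") := by
  rw [pvKey2Label, pvFind_label _ _ _ (by decide)]
  simp [pvTable, pvBeq_comm (b := k), eq_comm (b := k), Bool.or_assoc]
theorem pvLabel_extractor (k : String) : (pvKey2Label k == some "extractor_changed") = (k == "extract_source" || k == "confidence_score" || k == "is_fallback" || k == "is_primary_hero") := by
  rw [pvKey2Label, pvFind_label _ _ _ (by decide)]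
  simp [pvTable, pvBeq_comm (b := k), eq_comm (b := k), Bool.or_assoc]

-- each of B's six membership tests equals A's corresponding any-over-keys test
theorem pvHit_image (diffs : List (String × List (String × String))) :
    PySem.Set.contains (pvHit diffs) "image_changed" = ["img_url", "img_local", "img_signature"].any (pvHasKey diffs) := by
  simp only [pvContains_hit, pvLabel_image, List.any_cons, List.any_nil, pvHasKey, Bool.or_false, pvAny_or, Bool.or_assoc]
theorem pvHit_link (diffs : List (String × List (String × String))) :
    PySem.Set.contains (pvHit diffs) "link_changed" = pvHasKey diffs "href_clean" := by
  simp only [pvContains_hit, pvLabel_link, pvHasKey]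
theorem pvHit_landing (diffs : List (String × List (String × String))) :
    PySem.Set.contains (pvHit diffs) "landing_text_changed" = ["landing_title", "landing_subtitle", "landing_summary", "landing_keywords", "landing_category"].any (pvHasKey diffs) := by
  simp only [pvContains_hit, pvLabel_landing, List.any_cons, List.any_nil, pvHasKey, Bool.or_false, pvAny_or, Bool.or_assoc]
theorem pvHit_title (diffs : List (String × List (String × String))) :
    PySem.Set.contains (pvHit diffs) "title_changed" = pvHasKey diffs "title" := by
  simp only [pvContains_hit, pvLabel_title, pvHasKey]
theorem pvHit_date (diffs : List (String × List (String × String))) :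
    PySem.Set.contains (pvHit diffs) "date_changed" = ["plan_start", "plan_end"].any (pvHasKey diffs) := by
  simp only [pvContains_hit, pvLabel_date, List.any_cons, List.any_nil, pvHasKey, Bool.or_false, pvAny_or, Bool.or_assoc]
theorem pvHit_extractor (diffs : List (String × List (String × String))) :
    PySem.Set.contains (pvHit diffs) "extractor_changed" = ["extract_source", "confidence_score", "is_fallback", "is_primary_hero"].any (pvHasKey diffs) := by
  simp only [pvContains_hit, pvLabel_extractor, List.any_cons, List.any_nil, pvHasKey, Bool.or_false, pvAny_or, Bool.or_assoc]

-- A's accumulator chain equals B's base-plus-filtered-order shape, for arbitrary conditions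
theorem pvCore (c0 c1 c2 c3 c4 c5 c6 e : Bool) (f : String → Bool)
    (h1 : f "image_changed" = c1) (h2 : f "link_changed" = c2) (h3 : f "landing_text_changed" = c3)
    (h4 : f "title_changed" = c4) (h5 : f "date_changed" = c5) (h6 : f "extractor_changed" = c6) :
    (let s0 : List String := []
     let s1 := if c0 then s0 ++ ["rank_shift"] else s0
     let s2 := if c1 then s1 ++ ["image_changed"] else s1
     let s3 := if c2 then s2 ++ ["link_changed"] else s2
     let s4 := if c3 then s3 ++ ["landing_text_changed"] else s3
     let s5 := if c4 then s4 ++ ["title_changed"] else s4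
     let s6 := if c5 then s5 ++ ["date_changed"] else s5
     let s7 := if c6 then s6 ++ ["extractor_changed"] else s6
     if s7.isEmpty && !e then s7 ++ ["content_changed"] else s7) =
    (let base := if c0 then ["rank_shift"] else []
     let s := base ++ pvOrder.filter f
     if s.isEmpty && !e then s ++ ["content_changed"] else s) := by
  simp only [pvOrder, List.filter_cons, List.filter_nil, h1, h2, h3, h4, h5, h6]
  cases c0 <;> cases c1 <;> cases c2 <;> cases c3 <;> cases c4 <;> cases c5 <;>
    cases c6 <;> cases e <;> rfl

-- ===== VERDICT =====
theorem change_subtypes_py_spec : Claim_equal_change_subtypes_py := by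
  intro prev_row curr_row diffs _
  unfold Spec_change_subtypes_py change_subtypes_py change_subtypes_py_alt
  exact pvCore (pvGetD prev_row "rank" != pvGetD curr_row "rank")
    (["img_url", "img_local", "img_signature"].any (pvHasKey diffs))
    (pvHasKey diffs "href_clean")
    (["landing_title", "landing_subtitle", "landing_summary", "landing_keywords", "landing_category"].any (pvHasKey diffs))
    (pvHasKey diffs "title")
    (["plan_start", "plan_end"].any (pvHasKey diffs))
    (["extract_source", "confidence_score", "is_fallback", "is_primary_hero"].any (pvHasKey diffs))
    diffs.isEmpty (fun label => PySem.Set.contains (pvHit diffs) label)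
    (pvHit_image diffs) (pvHit_link diffs) (pvHit_landing diffs)
    (pvHit_title diffs) (pvHit_date diffs) (pvHit_extractor diffs)
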